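-- pv_equiv track=rewrite | github.com/MaxTretikov/tablemutant | tablemutant/core/table_processor.py | parse_column_indices
-- ===== SOURCE A (Python) =====
-- from typing import List, Optional
--
-- def parse_column_indices(indices_str: str, total_columns: int) -> List[int]:
--     """Parse column indices from string like '0-2,4,6-8'."""
--     if not indices_str:
--         return list(range(total_columns))
--
--     indices = []
--     parts = indices_str.split(',')
--
--     for part in parts:
--         part = part.strip()
--         if '-' in part:
--             start, end = map(int, part.split('-'))
--             indices.extend(range(start, end + 1))
--         else:
--             indices.append(int(part))
--
--     # Filter valid indices
--     indices = [i for i in indices if 0 <= i < total_columns]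
--     return sorted(set(indices))
-- ===== SOURCE B (Python) =====
-- def parse_column_indices(indices_str, total_columns):
--     """Parse column indices from string like '0-2,4,6-8'."""
--     if not indices_str:
--         return list(range(total_columns))
--
--     intervals = []
--     for part in indices_str.split(','):
--         part = part.strip()
--         if '-' in part:
--             start, end = map(int, part.split('-'))
--         else:
--             start = end = int(part)
--         lo = max(start, 0)
--         hi = min(end, total_columns - 1)
--         if lo <= hi:
--             intervals.append((lo, hi))
--
--     intervals.sort(key=lambda iv: iv[0])
--     out = []
--     last = -1
--     for lo, hi in intervals:
--         begin = max(lo, last + 1)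
--         if begin <= hi:
--             out.extend(range(begin, hi + 1))
--             last = hi
--     return out
-- ===== Notes on version B (the rewrite author's own statement) =====
-- stated objective: alternative
-- what changed: B never materialises every index of every range: it clips each parsed (start,end) to [0,total_columns), sorts the clipped intervals by start, and emits each interval from past a high-water mark, so A's per-index list, set() deduplication and sorted() over indices all disappear.
import Mathlib
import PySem

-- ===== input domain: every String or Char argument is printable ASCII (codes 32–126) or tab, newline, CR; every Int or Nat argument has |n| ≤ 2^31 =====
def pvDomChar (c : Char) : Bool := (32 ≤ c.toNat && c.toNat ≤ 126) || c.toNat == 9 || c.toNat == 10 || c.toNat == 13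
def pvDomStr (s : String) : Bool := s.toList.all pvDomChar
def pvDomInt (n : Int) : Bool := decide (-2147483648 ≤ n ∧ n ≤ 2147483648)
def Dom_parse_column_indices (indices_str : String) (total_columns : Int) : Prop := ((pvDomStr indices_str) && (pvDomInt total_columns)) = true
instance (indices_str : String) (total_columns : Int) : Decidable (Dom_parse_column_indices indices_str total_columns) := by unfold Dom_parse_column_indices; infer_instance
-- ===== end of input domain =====

set_option maxHeartbeats 1000000


-- B replaces A's "collect every index, filter, set(), sorted()" by clipped (start, end) intervals
-- sorted by start and emitted left-to-right past a high-water mark: no per-index list, no set, no sort of indices.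

-- ===== PORT A =====
-- one comma part of A: strip, then either "start-end" -> range(start, end+1), or a single int;
-- none = the parts where Python's int()/tuple-unpacking raises ValueError (excluded by Pre_; the .getD [] below never fires under Pre_)
def pvA_part (part : String) : Option (List Int) :=
  let p := PySem.Str.strip part
  if PySem.Str.isIn "-" p then
    match ((PySem.Str.split? p "-").getD []).map PySem.Int.ofStr? with
    | [some a, some b] => some (PySem.List.pyRange a (b + 1) 1)
    | _ => none
  else (PySem.Int.ofStr? p).map (fun v => [v])

def parse_column_indices (indices_str : String) (total_columns : Int) : List Int :=
  if indices_str = "" then PySem.List.pyRange 0 total_columns 1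
  else
    let parts := (PySem.Str.split? indices_str ",").getD []
    let indices := parts.foldl (fun acc part => acc ++ (pvA_part part).getD []) []
    let indices := indices.filter (fun i => decide (0 ≤ i) && decide (i < total_columns))
    PySem.List.sorted (PySem.Set.ofList indices) (fun x => x) false

-- ===== PORT B =====
-- one comma part of B: the raw (start, end) bounds (a single int v is (v, v)); none = the same ValueError inputs as in A
def pvB_bounds (part : String) : Option (Int × Int) :=
  let p := PySem.Str.strip part
  if PySem.Str.isIn "-" p then
    match ((PySem.Str.split? p "-").getD []).map PySem.Int.ofStr? with
    | [some a, some b] => some (a, b)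
    | _ => none
  else (PySem.Int.ofStr? p).map (fun v => (v, v))

-- the final loop of Source B: emit each sorted interval from max(lo, last+1) on, keeping the high-water mark `last`
def pvB_emit : List (Int × Int) → Int → List Int
  | [], _ => []
  | (lo, hi) :: rest, last =>
    let begin_ := max lo (last + 1)
    if begin_ ≤ hi then PySem.List.pyRange begin_ (hi + 1) 1 ++ pvB_emit rest hi
    else pvB_emit rest last

def parse_column_indices_alt (indices_str : String) (total_columns : Int) : List Int :=
  if indices_str = "" then PySem.List.pyRange 0 total_columns 1
  else
    let parts := (PySem.Str.split? indices_str ",").getD []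
    let intervals := parts.foldl (fun acc part =>
      match pvB_bounds part with
      | some (a, b) =>
        let lo := max a 0
        let hi := min b (total_columns - 1)
        if lo ≤ hi then acc ++ [(lo, hi)] else acc
      | none => acc) []
    pvB_emit (PySem.List.sorted intervals (fun iv => iv.1) false) (-1)

-- ===== PRECONDITION & SPEC =====
-- Pre_ excludes exactly the inputs where Python A raises ValueError in int() / tuple unpacking (B raises there too):
-- each stripped comma part must either contain '-' and split into exactly two int()-parsable pieces, or be int()-parsable itself
def Pre_parse_column_indices (indices_str : String) (total_columns : Int) : Prop :=
  indices_str = "" ∨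
    ∀ part ∈ (PySem.Str.split? indices_str ",").getD [],
      let p := PySem.Str.strip part
      if PySem.Str.isIn "-" p then
        ((PySem.Str.split? p "-").getD []).length = 2 ∧
          ∀ q ∈ (PySem.Str.split? p "-").getD [], (PySem.Int.ofStr? q).isSome
      else (PySem.Int.ofStr? p).isSome
instance (indices_str : String) (total_columns : Int) : Decidable (Pre_parse_column_indices indices_str total_columns) := by
  unfold Pre_parse_column_indices; infer_instance

def pvWitness_parse_column_indices : String × Int := ("0-2, 4 ,6-8", 8)

def Spec_parse_column_indices (indices_str : String) (total_columns : Int) (out : List Int) : Prop := out = parse_column_indices_alt indices_str total_columns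
instance (indices_str : String) (total_columns : Int) (out : List Int) : Decidable (Spec_parse_column_indices indices_str total_columns out) := by unfold Spec_parse_column_indices; infer_instance

-- ===== CLAIM (what is proved, stated in full; the proofs are below) =====
def Claim_equal_parse_column_indices : Prop := ∀ (indices_str : String) (total_columns : Int), Dom_parse_column_indices indices_str total_columns → Pre_parse_column_indices indices_str total_columns → Spec_parse_column_indices indices_str total_columns (parse_column_indices indices_str total_columns)

-- ===== LEMMAS AND PROOFS =====

-- pvPartOk part (proof abbreviation for Pre_'s per-part condition): Python's handling of one comma part returns normally
def pvPartOk (part : String) : Prop :=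
  let p := PySem.Str.strip part
  if PySem.Str.isIn "-" p then
    ((PySem.Str.split? p "-").getD []).length = 2 ∧
      ∀ q ∈ (PySem.Str.split? p "-").getD [], (PySem.Int.ofStr? q).isSome
  else (PySem.Int.ofStr? p).isSome

-- a part satisfying pvPartOk parses, and A's index list for it is exactly range(a, b+1) for B's bounds (a, b)
theorem pv_part_ok (part : String) (h : pvPartOk part) :
    ∃ a b, pvB_bounds part = some (a, b) ∧ pvA_part part = some (PySem.List.pyRange a (b + 1) 1) := by
  simp only [pvA_part, pvB_bounds, pvPartOk] at h ⊢
  set p := PySem.Str.strip part with hp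
  by_cases hd : PySem.Str.isIn "-" p
  · simp only [hd, if_true] at h ⊢
    obtain ⟨hlen, hall⟩ := h
    set l := (PySem.Str.split? p "-").getD [] with hl
    match l, hlen with
    | [q1, q2], _ =>
      obtain ⟨a, ha⟩ := Option.isSome_iff_exists.mp (hall q1 (by simp))
      obtain ⟨b, hb⟩ := Option.isSome_iff_exists.mp (hall q2 (by simp))
      exact ⟨a, b, by simp [ha, hb]⟩
  · simp only [hd] at h ⊢
    obtain ⟨v, hv⟩ := Option.isSome_iff_exists.mp h
    exact ⟨v, v, by simp [hv], by simp [hv, PySem.List.pyRange_one_singleton]⟩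

-- membership/order spec of Source B's emit loop over nonempty, start-sorted intervals
theorem pv_emit_spec (ivs : List (Int × Int)) (last : Int)
    (hs : ivs.Pairwise (fun a b => a.1 ≤ b.1)) (hne : ∀ iv ∈ ivs, iv.1 ≤ iv.2) :
    (pvB_emit ivs last).Pairwise (· < ·) ∧
      ∀ x, x ∈ pvB_emit ivs last ↔ last < x ∧ ∃ iv ∈ ivs, iv.1 ≤ x ∧ x ≤ iv.2 := by
  induction ivs generalizing last with
  | nil => simp [pvB_emit]
  | cons iv rest ih =>
    obtain ⟨lo, hi⟩ := iv
    obtain ⟨hhead, hs'⟩ := List.pairwise_cons.mp hs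
    have hne' : ∀ iv ∈ rest, iv.1 ≤ iv.2 := fun iv h => hne iv (List.mem_cons_of_mem _ h)
    have hlohi : lo ≤ hi := hne (lo, hi) List.mem_cons_self
    simp only [pvB_emit]
    by_cases hb : max lo (last + 1) ≤ hi
    · simp only [hb, if_true]
      obtain ⟨ihp, ihm⟩ := ih hi hs' hne'
      constructor
      · refine List.pairwise_append.mpr ⟨PySem.List.pairwise_lt_pyRange_one _ _, ihp, ?_⟩
        intro x hx y hy
        have hx' : x < hi + 1 := (PySem.List.mem_pyRange_one.mp hx).2
        have hy' : hi < y := ((ihm y).mp hy).1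
        omega
      · intro x
        simp only [List.mem_append, PySem.List.mem_pyRange_one]
        rw [ihm]
        simp only [List.mem_cons]
        constructor
        · rintro (⟨h1, h2⟩ | ⟨h1, iv', h2, h3⟩)
          · exact ⟨by omega, (lo, hi), Or.inl rfl, by omega⟩
          · exact ⟨by omega, iv', Or.inr h2, h3⟩
        · rintro ⟨hlx, iv', (rfl | h2), h3, h4⟩
          · exact Or.inl (by simp at h3 h4 ⊢; omega)
          · by_cases hxhi : x ≤ hi
            · have := hhead iv' h2
              exact Or.inl ⟨by omega, by omega⟩
            · exact Or.inr ⟨by omega, iv', h2, h3, h4⟩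
    · simp only [hb, if_false]
      obtain ⟨ihp, ihm⟩ := ih last hs' hne'
      refine ⟨ihp, fun x => ?_⟩
      rw [ihm]
      constructor
      · rintro ⟨h1, iv', h2, h3⟩
        exact ⟨h1, iv', List.mem_cons_of_mem _ h2, h3⟩
      · rintro ⟨h1, iv', h2, h3, h4⟩
        rcases List.mem_cons.mp h2 with rfl | h2'
        · simp at h3 h4; omega
        · exact ⟨h1, iv', h2', h3, h4⟩

-- the two folds over the same comma parts: B's clipped intervals lie inside [0, tc), and an index
-- 0 ≤ x < tc is collected by A's loop iff some clipped interval of B covers it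
theorem pv_fold_rel (tc : Int) (parts : List String)
    (hok : ∀ part ∈ parts, pvPartOk part)
    (accA : List Int) (accB : List (Int × Int))
    (hinv : ∀ iv ∈ accB, 0 ≤ iv.1 ∧ iv.1 ≤ iv.2 ∧ iv.2 ≤ tc - 1)
    (hcov : ∀ x : Int, 0 ≤ x → x < tc → (x ∈ accA ↔ ∃ iv ∈ accB, iv.1 ≤ x ∧ x ≤ iv.2)) :
    (∀ iv ∈ parts.foldl (fun acc part =>
        match pvB_bounds part with
        | some (a, b) =>
          let lo := max a 0
          let hi := min b (tc - 1)
          if lo ≤ hi then acc ++ [(lo, hi)] else acc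
        | none => acc) accB, 0 ≤ iv.1 ∧ iv.1 ≤ iv.2 ∧ iv.2 ≤ tc - 1) ∧
    ∀ x : Int, 0 ≤ x → x < tc →
      (x ∈ parts.foldl (fun acc part => acc ++ (pvA_part part).getD []) accA ↔
        ∃ iv ∈ parts.foldl (fun acc part =>
          match pvB_bounds part with
          | some (a, b) =>
            let lo := max a 0
            let hi := min b (tc - 1)
            if lo ≤ hi then acc ++ [(lo, hi)] else acc
          | none => acc) accB, iv.1 ≤ x ∧ x ≤ iv.2) := by
  induction parts generalizing accA accB with
  | nil => exact ⟨hinv, fun x h1 h2 => hcov x h1 h2⟩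
  | cons part rest ih =>
    obtain ⟨a, b, hB, hA⟩ := pv_part_ok part (hok part List.mem_cons_self)
    have hok' : ∀ p ∈ rest, pvPartOk p := fun p h => hok p (List.mem_cons_of_mem _ h)
    simp only [List.foldl_cons, hB, hA, Option.getD_some]
    by_cases hcl : max a 0 ≤ min b (tc - 1)
    · simp only [hcl, if_true]
      apply ih hok'
      · intro iv hiv
        rcases List.mem_append.mp hiv with h | h
        · exact hinv iv h
        · simp at h; subst h; simp; omega
      · intro x h1 h2
        rw [List.mem_append, hcov x h1 h2, PySem.List.mem_pyRange_one]
        constructor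
        · rintro (⟨iv, hm, hc⟩ | ⟨ha, hb2⟩)
          · exact ⟨iv, List.mem_append.mpr (Or.inl hm), hc⟩
          · exact ⟨(max a 0, min b (tc - 1)), List.mem_append.mpr (Or.inr (by simp)), by omega⟩
        · rintro ⟨iv, hm, hc⟩
          rcases List.mem_append.mp hm with h | h
          · exact Or.inl ⟨iv, h, hc⟩
          · simp at h; subst h; simp at hc; right; omega
    · simp only [hcl, if_false]
      apply ih hok' _ _ hinv
      intro x h1 h2
      rw [List.mem_append, hcov x h1 h2, PySem.List.mem_pyRange_one]
      constructor
      · rintro (h | h)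
        · exact h
        · omega
      · exact Or.inl

-- ===== VERDICT (by name: the statement is the Claim_ definition above) =====
theorem parse_column_indices_spec : Claim_equal_parse_column_indices := by
  intro s tc _hdom hpre
  unfold Spec_parse_column_indices
  by_cases hs : s = ""
  · simp [parse_column_indices, parse_column_indices_alt, hs]
  · rcases hpre with h | hok
    · exact absurd h hs
    simp only [parse_column_indices, parse_column_indices_alt, if_neg hs]
    obtain ⟨hinv, hcov⟩ := pv_fold_rel tc ((PySem.Str.split? s ",").getD []) hok [] []
      (by simp) (by simp)
    set ivs := ((PySem.Str.split? s ",").getD []).foldl (fun acc part =>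
      match pvB_bounds part with
      | some (a, b) =>
        let lo := max a 0
        let hi := min b (tc - 1)
        if lo ≤ hi then acc ++ [(lo, hi)] else acc
      | none => acc) [] with hivs
    set sivs := PySem.List.sorted ivs (fun iv => iv.1) false with hsivs
    have hmem_s : ∀ iv, iv ∈ sivs ↔ iv ∈ ivs := fun iv => PySem.List.mem_sorted ivs (fun iv => iv.1) false iv
    have hne : ∀ iv ∈ sivs, iv.1 ≤ iv.2 := fun iv h => (hinv iv ((hmem_s iv).mp h)).2.1
    obtain ⟨hpairB, hmemB⟩ := pv_emit_spec sivs (-1) (PySem.List.sorted_pairwise ..) hne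
    refine PySem.List.sorted_eq_of_perm_of_pairwise_lt _ _ _ ?_ hpairB
    apply (List.perm_ext_iff_of_nodup (hpairB.imp fun h => ne_of_lt h) (PySem.Set.nodup_ofList _)).mpr
    intro x
    rw [hmemB x, PySem.Set.mem_ofList, List.mem_filter]
    constructor
    · rintro ⟨hneg, iv, hmem, hc1, hc2⟩
      have hb := hinv iv ((hmem_s iv).mp hmem)
      have hx0 : 0 ≤ x := by omega
      have hx1 : x < tc := by omega
      refine ⟨(hcov x hx0 hx1).mpr ⟨iv, (hmem_s iv).mp hmem, hc1, hc2⟩, ?_⟩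
      simp; omega
    · rintro ⟨hmemA, hdec⟩
      have hx0 : 0 ≤ x := by simpa using (by simp at hdec; omega : (0:Int) ≤ x)
      have hx1 : x < tc := by simp at hdec; omega
      obtain ⟨iv, hmem, hc⟩ := (hcov x hx0 hx1).mp hmemA
      exact ⟨by omega, iv, (hmem_s iv).mpr hmem, hc⟩
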